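-- pv_equiv track=rewrite | github.com/BetaBWJaguar/ZeroToDev-DeveloperGUI | ai_system/data_collection/DataCollection.py | _count_tts_events
-- ===== SOURCE A (Python) =====
-- from typing import Any, Dict, List, Optional, Generator, Tuple
--
-- def _count_tts_events(tts_logs: List[Dict[str, Any]]) -> Dict[str, int]:
--     preview_events = {"PREVIEW_REQUEST", "TTS_PREVIEW_START"}
--     convert_events = {"CONVERT_REQUEST", "CONVERT_DONE", "SUCCESS"}
--     fail_events = {"ERROR", "CONVERT_FAIL"}
--
--     counts = {"preview": 0, "convert": 0, "failure": 0}
--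
--     for log in tts_logs:
--         event = log.get("event")
--         if event in preview_events:
--             counts["preview"] += 1
--         elif event in convert_events:
--             counts["convert"] += 1
--         elif event in fail_events:
--             counts["failure"] += 1
--
--     return counts
-- ===== SOURCE B (Python) =====
-- def _count_tts_events(tts_logs):
--     preview_events = ["PREVIEW_REQUEST", "TTS_PREVIEW_START"]
--     convert_events = ["CONVERT_REQUEST", "CONVERT_DONE", "SUCCESS"]
--     fail_events = ["ERROR", "CONVERT_FAIL"]
--
--     tally = {}
--     for log in tts_logs:
--         e = log.get("event")
--         tally[e] = tally.get(e, 0) + 1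
--
--     return {
--         "preview": sum(tally.get(e, 0) for e in preview_events),
--         "convert": sum(tally.get(e, 0) for e in convert_events),
--         "failure": sum(tally.get(e, 0) for e in fail_events),
--     }
-- ===== Notes on version B (the rewrite author's own statement) =====
-- stated objective: alternative
-- what changed: B replaces A's per-log three-way category branch by a single tally (dict of raw event counts) followed by three per-category sums over that tally, relying on the disjointness of the category event sets.
import Mathlib
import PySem

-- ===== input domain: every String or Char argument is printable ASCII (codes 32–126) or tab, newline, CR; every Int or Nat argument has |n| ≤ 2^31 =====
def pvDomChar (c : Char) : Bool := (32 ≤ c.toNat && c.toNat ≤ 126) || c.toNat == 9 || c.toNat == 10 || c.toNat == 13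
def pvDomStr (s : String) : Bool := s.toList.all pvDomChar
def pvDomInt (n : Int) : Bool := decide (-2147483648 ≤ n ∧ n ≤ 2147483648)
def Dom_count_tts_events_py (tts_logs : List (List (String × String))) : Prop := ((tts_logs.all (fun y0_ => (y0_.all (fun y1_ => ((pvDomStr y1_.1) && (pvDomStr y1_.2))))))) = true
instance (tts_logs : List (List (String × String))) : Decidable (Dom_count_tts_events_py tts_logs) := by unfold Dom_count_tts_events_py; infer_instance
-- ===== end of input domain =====

-- B replaces A's per-log three-way branch by a single tally of raw event strings followed by
-- three per-category sums over that tally (objective: alternative decomposition, not faster).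

-- ===== PORT A =====
def count_tts_events_py (tts_logs : List (List (String × String))) : List (String × Int) :=
  let preview_events : PySem.Set String := PySem.Set.ofList ["PREVIEW_REQUEST", "TTS_PREVIEW_START"]
  let convert_events : PySem.Set String := PySem.Set.ofList ["CONVERT_REQUEST", "CONVERT_DONE", "SUCCESS"]
  let fail_events : PySem.Set String := PySem.Set.ofList ["ERROR", "CONVERT_FAIL"]
  let counts0 : PySem.Dict String Int := PySem.Dict.ofList [("preview", 0), ("convert", 0), ("failure", 0)]
  let counts := tts_logs.foldl (fun counts log =>
    let event := (PySem.Dict.mk log).get? "event"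
    if event.any (fun s => PySem.Set.contains preview_events s) then
      counts.modify "preview" 0 (· + 1)
    else if event.any (fun s => PySem.Set.contains convert_events s) then
      counts.modify "convert" 0 (· + 1)
    else if event.any (fun s => PySem.Set.contains fail_events s) then
      counts.modify "failure" 0 (· + 1)
    else counts) counts0
  counts.items

-- ===== PORT B =====
def count_tts_events_py_alt (tts_logs : List (List (String × String))) : List (String × Int) :=
  let preview_events := ["PREVIEW_REQUEST", "TTS_PREVIEW_START"]
  let convert_events := ["CONVERT_REQUEST", "CONVERT_DONE", "SUCCESS"]
  let fail_events := ["ERROR", "CONVERT_FAIL"]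
  let tally : PySem.Dict (Option String) Int :=
    tts_logs.foldl (fun d log =>
      let e := (PySem.Dict.mk log).get? "event"
      d.insert e (d.getD e 0 + 1)) PySem.Dict.empty
  [("preview", (preview_events.map (fun e => tally.getD (some e) 0)).sum),
   ("convert", (convert_events.map (fun e => tally.getD (some e) 0)).sum),
   ("failure", (fail_events.map (fun e => tally.getD (some e) 0)).sum)]

-- ===== PRECONDITION & SPEC =====
def Spec_count_tts_events_py (tts_logs : List (List (String × String))) (out : List (String × Int)) : Prop := out = count_tts_events_py_alt tts_logs
instance (tts_logs : List (List (String × String))) (out : List (String × Int)) : Decidable (Spec_count_tts_events_py tts_logs out) := by unfold Spec_count_tts_events_py; infer_instance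

-- ===== CLAIM (what is proved, stated in full; the proofs are below) =====
def Claim_equal_count_tts_events_py : Prop := ∀ (tts_logs : List (List (String × String))), Dom_count_tts_events_py tts_logs → Spec_count_tts_events_py tts_logs (count_tts_events_py tts_logs)

-- ===== LEMMAS AND PROOFS =====

-- the event extracted from one log
def pvEv (log : List (String × String)) : Option String := (PySem.Dict.mk log).get? "event"

def pvIsPrev (e : Option String) : Bool := e.any (fun s => PySem.Set.contains (PySem.Set.ofList ["PREVIEW_REQUEST", "TTS_PREVIEW_START"]) s)
def pvIsConv (e : Option String) : Bool := e.any (fun s => PySem.Set.contains (PySem.Set.ofList ["CONVERT_REQUEST", "CONVERT_DONE", "SUCCESS"]) s)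
def pvIsFail (e : Option String) : Bool := e.any (fun s => PySem.Set.contains (PySem.Set.ofList ["ERROR", "CONVERT_FAIL"]) s)

lemma modPrev (p c f : Int) : (PySem.Dict.ofList [("preview",p),("convert",c),("failure",f)]).modify "preview" 0 (·+1) = PySem.Dict.ofList [("preview",p+1),("convert",c),("failure",f)] := rfl
lemma modConv (p c f : Int) : (PySem.Dict.ofList [("preview",p),("convert",c),("failure",f)]).modify "convert" 0 (·+1) = PySem.Dict.ofList [("preview",p),("convert",c+1),("failure",f)] := rfl
lemma modFail (p c f : Int) : (PySem.Dict.ofList [("preview",p),("convert",c),("failure",f)]).modify "failure" 0 (·+1) = PySem.Dict.ofList [("preview",p),("convert",c),("failure",f+1)] := rfl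

lemma foldA_closed (logs : List (List (String × String))) (p c f : Int) :
    logs.foldl (fun counts log =>
      if pvIsPrev ((PySem.Dict.mk log).get? "event") then counts.modify "preview" 0 (· + 1)
      else if pvIsConv ((PySem.Dict.mk log).get? "event") then counts.modify "convert" 0 (· + 1)
      else if pvIsFail ((PySem.Dict.mk log).get? "event") then counts.modify "failure" 0 (· + 1)
      else counts) (PySem.Dict.ofList [("preview", p), ("convert", c), ("failure", f)])
    = PySem.Dict.ofList [("preview", p + (logs.countP (fun l => pvIsPrev (pvEv l)))),
        ("convert", c + (logs.countP (fun l => !pvIsPrev (pvEv l) && pvIsConv (pvEv l)))),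
        ("failure", f + (logs.countP (fun l => !pvIsPrev (pvEv l) && !pvIsConv (pvEv l) && pvIsFail (pvEv l))))] := by
  induction logs generalizing p c f with
  | nil => simp
  | cons l ls ih =>
    simp only [pvEv] at ih
    simp only [List.foldl_cons, List.countP_cons, pvEv]
    by_cases hp : pvIsPrev ((PySem.Dict.mk l).get? "event") = true
    · simp only [hp, if_true, modPrev, ih]
      congr 1
      simp [hp]
      all_goals omega
    · by_cases hc : pvIsConv ((PySem.Dict.mk l).get? "event") = true
      · simp only [hp, hc, if_true, if_false, Bool.false_eq_true, modConv, ih]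
        congr 1
        simp [hp, hc]
        all_goals omega
      · by_cases hf : pvIsFail ((PySem.Dict.mk l).get? "event") = true
        · simp only [hp, hc, hf, if_true, if_false, Bool.false_eq_true, modFail, ih]
          congr 1
          simp [hp, hc, hf]
          all_goals omega
        · simp only [hp, hc, hf, if_false, Bool.false_eq_true, ih]
          congr 1
          all_goals simp [hp, hc, hf]

-- the three branch tests, characterised as equality with the category's event literals
lemma prevChar (e : Option String) : pvIsPrev e = ((e == some "PREVIEW_REQUEST") || (e == some "TTS_PREVIEW_START")) := by
  cases e <;> simp [pvIsPrev, PySem.Set.contains, PySem.Set.ofList, beq_eq_decide]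

lemma convChar (e : Option String) : (!pvIsPrev e && pvIsConv e) = ((e == some "CONVERT_REQUEST") || (e == some "CONVERT_DONE") || (e == some "SUCCESS")) := by
  cases e with
  | none => rfl
  | some s =>
    rw [Bool.eq_iff_iff]
    simp [pvIsPrev, pvIsConv, PySem.Set.contains, PySem.Set.ofList]
    constructor
    · tauto
    · rintro ((rfl | rfl) | rfl) <;> simp

lemma failChar (e : Option String) : (!pvIsPrev e && !pvIsConv e && pvIsFail e) = ((e == some "ERROR") || (e == some "CONVERT_FAIL")) := by
  cases e with
  | none => rfl
  | some s =>
    rw [Bool.eq_iff_iff]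
    simp [pvIsPrev, pvIsConv, pvIsFail, PySem.Set.contains, PySem.Set.ofList]
    rintro (rfl | rfl) <;> simp

-- a countP of a disjunction of disjoint tests splits into a sum
lemma countP_or₂ {α : Type} (l : List α) (q r : α → Bool) (h : ∀ x, q x = true → r x = false) :
    l.countP (fun x => q x || r x) = l.countP q + l.countP r := by
  induction l with
  | nil => simp
  | cons a t ih =>
    by_cases hq : q a = true <;> by_cases hr : r a = true <;>
      simp [List.countP_cons, hq, hr, ih] <;> first | omega | exact absurd (h a hq) (by simp [hr])

lemma tallyB_getD (logs : List (List (String × String))) (v : Option String) :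
    (logs.foldl (fun d log =>
      d.insert ((PySem.Dict.mk log).get? "event") (d.getD ((PySem.Dict.mk log).get? "event") 0 + 1))
      (PySem.Dict.empty : PySem.Dict (Option String) Int)).getD v 0
    = ((logs.map pvEv).count v : Int) := by
  rw [show (logs.foldl (fun (d : PySem.Dict (Option String) Int) log =>
      d.insert ((PySem.Dict.mk log).get? "event") (d.getD ((PySem.Dict.mk log).get? "event") 0 + 1))
      PySem.Dict.empty)
    = ((logs.map pvEv).foldl (fun d e => d.insert e (d.getD e 0 + 1)) PySem.Dict.empty)
    from (List.foldl_map (f := pvEv) (g := fun (d : PySem.Dict (Option String) Int) e => d.insert e (d.getD e 0 + 1)) (l := logs) (init := PySem.Dict.empty)).symm,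
    PySem.Dict.getD_foldl_insert_add_one]
  simp

-- ===== VERDICT (by name: the statement is the Claim_ definition above) =====
theorem count_tts_events_py_spec : Claim_equal_count_tts_events_py := by
  intro logs _
  unfold Spec_count_tts_events_py
  have hA : count_tts_events_py logs =
      (logs.foldl (fun counts log =>
        if pvIsPrev ((PySem.Dict.mk log).get? "event") then counts.modify "preview" 0 (· + 1)
        else if pvIsConv ((PySem.Dict.mk log).get? "event") then counts.modify "convert" 0 (· + 1)
        else if pvIsFail ((PySem.Dict.mk log).get? "event") then counts.modify "failure" 0 (· + 1)
        else counts) (PySem.Dict.ofList [("preview", 0), ("convert", 0), ("failure", 0)])).items := rfl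
  have hB : count_tts_events_py_alt logs =
      (let tally := logs.foldl (fun (d : PySem.Dict (Option String) Int) log =>
        d.insert ((PySem.Dict.mk log).get? "event") (d.getD ((PySem.Dict.mk log).get? "event") 0 + 1))
        PySem.Dict.empty
      [("preview", tally.getD (some "PREVIEW_REQUEST") 0 + (tally.getD (some "TTS_PREVIEW_START") 0 + 0)),
       ("convert", tally.getD (some "CONVERT_REQUEST") 0 + (tally.getD (some "CONVERT_DONE") 0 + (tally.getD (some "SUCCESS") 0 + 0))),
       ("failure", tally.getD (some "ERROR") 0 + (tally.getD (some "CONVERT_FAIL") 0 + 0))]) := rfl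
  rw [hA, hB, foldA_closed]
  simp only [tallyB_getD]
  rw [show ∀ (p c f : Int), (PySem.Dict.ofList [("preview",p),("convert",c),("failure",f)]).items
      = [("preview",p),("convert",c),("failure",f)] from fun _ _ _ => rfl]
  simp only [List.cons.injEq, Prod.mk.injEq, true_and, and_true]
  have hmk : ∀ (p : Option String → Bool),
      (logs.map pvEv).countP p = logs.countP (fun x => p (pvEv x)) := by
    intro p; simp [List.countP_map]; rfl
  refine ⟨?_, ?_, ?_⟩
  · rw [List.count_eq_countP, List.count_eq_countP, hmk, hmk,
      List.countP_congr (fun x _ => by rw [prevChar]),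
      countP_or₂ _ _ _ (by intro x hx; revert hx; cases hv : pvEv x <;> simp <;> intro h <;> simp [h])]
    push_cast; ring
  · rw [List.count_eq_countP, List.count_eq_countP, List.count_eq_countP, hmk, hmk, hmk,
      List.countP_congr (fun x _ => by rw [convChar]),
      show (fun x => pvEv x == some "CONVERT_REQUEST" || pvEv x == some "CONVERT_DONE" || pvEv x == some "SUCCESS")
        = (fun x => (pvEv x == some "CONVERT_REQUEST" || pvEv x == some "CONVERT_DONE") || pvEv x == some "SUCCESS")
        from rfl,
      countP_or₂ _ _ _ (by intro x hx; revert hx; cases hv : pvEv x <;> simp <;> rintro (h | h) <;> simp [h]),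
      countP_or₂ _ _ _ (by intro x hx; revert hx; cases hv : pvEv x <;> simp <;> intro h <;> simp [h])]
    push_cast; ring
  · rw [List.count_eq_countP, List.count_eq_countP, hmk, hmk,
      List.countP_congr (fun x _ => by rw [failChar]),
      countP_or₂ _ _ _ (by intro x hx; revert hx; cases hv : pvEv x <;> simp <;> intro h <;> simp [h])]
    push_cast; ring
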